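-- pv_equiv track=rewrite | github.com/shsh26/legendary-guacamole | BOJ/1065.py | solution
-- ===== SOURCE A (Python) =====
-- def detect(n: int):
--     num = str(n)
--     dis = 10
--     for i in range(0, len(num)-1):
--         if dis == 10:
--             dis = int(num[i]) - int(num[i + 1])
--         if dis != 10 and dis != int(num[i]) - int(num[i + 1]):
--             return False
--     return True
--
-- def solution(limit: int):
--     if limit < 100:
--         return limit
--     r = range(1, limit+1)
--     cnt = 0
--     for i in r:
--         if detect(i):
--             cnt += 1
--     return cnt
-- ===== SOURCE B (Python) =====
-- def solution(limit: int):
--     # Count numbers whose decimal digits form an arithmetic progression,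
--     # by enumerating (first digit, common difference) patterns instead of
--     # scanning every number up to limit.
--     if limit < 100:
--         return limit
--     cnt = 99  # every 1- or 2-digit number qualifies
--     for a in range(1, 10):
--         for d in range(-9, 10):
--             prev = a + d
--             if prev < 0 or prev > 9:
--                 continue
--             n = 10 * a + prev
--             while True:
--                 nd = prev + d
--                 if nd < 0 or nd > 9:
--                     break
--                 n = n * 10 + nd
--                 if n > limit:
--                     break
--                 cnt += 1
--                 prev = nd
--     return cnt
-- ===== Notes on version B (the rewrite author's own statement) =====
-- stated objective: faster
-- what changed: Instead of scanning every number 1..limit and re-checking its digit string, B enumerates (first digit, common difference) arithmetic digit patterns and counts how many of their values are <= limit.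
import Mathlib
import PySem

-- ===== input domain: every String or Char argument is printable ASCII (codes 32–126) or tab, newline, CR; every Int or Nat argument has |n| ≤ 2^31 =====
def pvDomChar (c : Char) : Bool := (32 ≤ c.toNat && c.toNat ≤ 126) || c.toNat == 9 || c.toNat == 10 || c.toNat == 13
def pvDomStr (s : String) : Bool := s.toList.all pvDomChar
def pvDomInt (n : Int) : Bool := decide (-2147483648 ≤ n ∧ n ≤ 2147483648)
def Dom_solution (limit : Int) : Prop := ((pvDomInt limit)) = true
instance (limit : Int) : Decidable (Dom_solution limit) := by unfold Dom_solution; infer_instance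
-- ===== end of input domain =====

-- B replaces A's scan of every number 1..limit by an enumeration of
-- (first digit, common difference) digit patterns; faster in a timing run.

-- ===== PORT A =====
-- int(num[i]) for detect: the index is always in range and the character is
-- always a decimal digit there, so the getD defaults are never used — exact.
def pyDigit (num : List Char) (i : Int) : Int :=
  (PySem.Int.ofChars? [PySem.List.pyGetD num i '0']).getD 0

-- the 'for i in range(0, len(num)-1)' loop of detect, with its early return False
def detectGo (num : List Char) (dis : Int) : List Int → Bool
  | [] => true
  | i :: rest =>
      let dis := if dis == 10 then pyDigit num i - pyDigit num (i + 1) else dis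
      if dis != 10 && dis != (pyDigit num i - pyDigit num (i + 1)) then false
      else detectGo num dis rest

def detect (n : Int) : Bool :=
  let num := (PySem.Int.toStr n).toList
  detectGo num 10 (PySem.List.pyRange 0 (PySem.List.len num - 1) 1)

def solution (limit : Int) : Int :=
  if limit < 100 then limit
  else (PySem.List.pyRange 1 (limit + 1) 1).foldl
        (fun cnt i => if detect i then cnt + 1 else cnt) 0

-- ===== PORT B =====
-- the 'while True' loop of Source B; the fuel only makes it total (it never runs out:
-- n at least decuples each iteration, so limit.natAbs + 1 iterations never happen)
def solAltGo (limit d : Int) : Nat → Int → Int → Int → Int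
  | 0, _, _, cnt => cnt
  | fuel + 1, prev, n, cnt =>
      let nd := prev + d
      if nd < 0 || 9 < nd then cnt
      else
        let n' := n * 10 + nd
        if limit < n' then cnt
        else solAltGo limit d fuel nd n' (cnt + 1)

def solution_alt (limit : Int) : Int :=
  if limit < 100 then limit
  else
    (PySem.List.pyRange 1 10 1).foldl (fun cnt a =>
      (PySem.List.pyRange (-9) 10 1).foldl (fun cnt d =>
        let prev := a + d
        if prev < 0 || 9 < prev then cnt
        else solAltGo limit d (limit.natAbs + 1) prev (10 * a + prev) cnt) cnt) 99

-- ===== PRECONDITION & SPEC =====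
def Spec_solution (limit : Int) (out : Int) : Prop := out = solution_alt limit
instance (limit : Int) (out : Int) : Decidable (Spec_solution limit out) := by
  unfold Spec_solution; infer_instance

-- ===== CLAIM (what is proved, stated in full; the proofs are below) =====
def Claim_equal_solution : Prop := ∀ (limit : Int), Dom_solution limit → Spec_solution limit (solution limit)

-- ===== LEMMAS AND PROOFS =====

-- digit pattern value machinery (B-side semantics)
def dig (a d : Int) (t : Nat) : Int := a + (t : Int) * d

def apval (a d : Int) : Nat → Int
  | 0 => 10 * a + (a + d)
  | j + 1 => apval a d j * 10 + dig a d (j + 2)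

abbrev okdig (a d : Int) (j : Nat) : Prop :=
  ∀ t : Nat, t ≤ j + 1 → 0 ≤ dig a d t ∧ dig a d t ≤ 9

abbrev okp (limit a d : Int) (j : Nat) : Prop := okdig a d j ∧ apval a d j ≤ limit

-- big-endian digit list of n, as integers
def bl (n : Int) : List Int := ((Nat.digits 10 n.toNat).reverse).map (fun k : Nat => (k : Int))

-- ---------- small arithmetic facts ----------

theorem dig_succ (a d : Int) (t : Nat) : dig a d t + d = dig a d (t + 1) := by
  simp [dig]; ring

theorem dig_zero (a d : Int) : dig a d 0 = a := by simp [dig]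

theorem okdig_mono (a d : Int) {i j : Nat} (h : okdig a d j) (hij : i ≤ j) : okdig a d i := by
  intro t ht; exact h t (by omega)

theorem apval_succ (a d : Int) (j : Nat) :
    apval a d (j + 1) = apval a d j * 10 + dig a d (j + 2) := rfl

theorem apval_bounds (a d : Int) (j : Nat) (ha : 1 ≤ a) (hok : okdig a d j) :
    10 ^ (j + 1) ≤ apval a d j ∧ apval a d j < 10 ^ (j + 2) := by
  induction j with
  | zero =>
    have h0 := hok 0 (by omega)
    have h1 := hok 1 (by omega)
    simp [dig] at h0 h1
    simp [apval]
    omega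
  | succ j ih =>
    have hok' : okdig a d j := okdig_mono a d hok (by omega)
    have ih' := ih hok'
    have hd := hok (j + 2) (by omega)
    rw [apval_succ]
    have h10 : (10 : Int) ^ (j + 1 + 1) = 10 ^ (j + 1) * 10 := pow_succ 10 (j + 1)
    have h11 : (10 : Int) ^ (j + 1 + 2) = 10 ^ (j + 2) * 10 := by
      rw [show j + 1 + 2 = (j + 2) + 1 from rfl, pow_succ]
    constructor
    · rw [h10]; nlinarith [ih'.1, hd.1]
    · rw [h11]; nlinarith [ih'.2, hd.2]

theorem apval_strict_mono (a d : Int) {i j : Nat} (ha : 1 ≤ a) (hok : okdig a d j)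
    (hij : i < j) : apval a d i < apval a d j := by
  induction j with
  | zero => omega
  | succ j ih =>
    have hok' : okdig a d j := okdig_mono a d hok (by omega)
    have hv := (apval_bounds a d j ha hok').1
    have hpow : (1 : Int) ≤ 10 ^ (j + 1) := one_le_pow₀ (by norm_num)
    have hd := hok (j + 2) (by omega)
    have hstep : apval a d j < apval a d (j + 1) := by
      rw [apval_succ]; nlinarith
    rcases Nat.lt_succ_iff_lt_or_eq.mp hij with h | h
    · exact lt_trans (ih hok' h) hstep
    · subst h; exact hstep

theorem apval_mono (a d : Int) {i j : Nat} (ha : 1 ≤ a) (hok : okdig a d j)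
    (hij : i ≤ j) : apval a d i ≤ apval a d j := by
  rcases Nat.lt_or_ge i j with h | h
  · exact le_of_lt (apval_strict_mono a d ha hok h)
  · have : i = j := by omega
    subst this; rfl

-- digits of apval are exactly the arithmetic pattern
theorem digits_apval (a d : Int) (j : Nat) (ha : 1 ≤ a) (hok : okdig a d j) :
    Nat.digits 10 (apval a d j).toNat
      = ((List.range (j + 2)).map (fun t => (dig a d t).toNat)).reverse := by
  induction j with
  | zero =>
    have h0 := hok 0 (by omega)
    have h1 := hok 1 (by omega)
    simp only [dig] at h0 h1
    push_cast at h0 h1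
    have hd0 : dig a d 0 = a := by simp [dig]
    have hd1 : dig a d 1 = a + d := by simp [dig]
    have hN : (apval a d 0).toNat = 10 * a.toNat + (a + d).toNat := by
      simp only [apval]; omega
    rw [hN, Nat.digits_def' (by norm_num : 1 < 10) (by omega)]
    have hmod : (10 * a.toNat + (a + d).toNat) % 10 = (a + d).toNat := by omega
    have hdiv : (10 * a.toNat + (a + d).toNat) / 10 = a.toNat := by omega
    rw [hmod, hdiv, Nat.digits_def' (by norm_num : 1 < 10) (by omega)]
    have : a.toNat % 10 = a.toNat := by omega
    rw [this]
    have : a.toNat / 10 = 0 := by omega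
    rw [this]
    simp [List.range_succ, hd0, hd1]
  | succ j ih =>
    have hok' : okdig a d j := okdig_mono a d hok (by omega)
    have hd := hok (j + 2) (by omega)
    have hv := apval_bounds a d j ha hok'
    have hpow : (1 : Int) ≤ 10 ^ (j + 1) := one_le_pow₀ (by norm_num)
    have hN : (apval a d (j + 1)).toNat = 10 * (apval a d j).toNat + (dig a d (j + 2)).toNat := by
      rw [apval_succ]; omega
    rw [hN, Nat.digits_def' (by norm_num : 1 < 10) (by omega)]
    have hmod : (10 * (apval a d j).toNat + (dig a d (j + 2)).toNat) % 10
        = (dig a d (j + 2)).toNat := by omega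
    have hdiv : (10 * (apval a d j).toNat + (dig a d (j + 2)).toNat) / 10
        = (apval a d j).toNat := by omega
    have hR : (List.map (fun t => (dig a d t).toNat) (List.range (j + 1 + 2))).reverse
        = (dig a d (j + 2)).toNat
            :: (List.map (fun t => (dig a d t).toNat) (List.range (j + 2))).reverse := by
      rw [show j + 1 + 2 = (j + 2) + 1 from rfl, List.range_succ]
      simp only [List.map_append, List.reverse_append, List.map_cons, List.map_nil,
        List.reverse_cons, List.reverse_nil, List.nil_append, List.singleton_append]
    rw [hmod, hdiv, ih hok', hR]

-- ---------- core toDigits ↔ digits bridge ----------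

theorem toDigitsCore_eq (fuel : Nat) : ∀ (n : Nat) (acc : List Char), 0 < n → n < 10 ^ fuel →
    Nat.toDigitsCore 10 fuel n acc = ((Nat.digits 10 n).map Nat.digitChar).reverse ++ acc := by
  induction fuel with
  | zero => intro n acc hn hlt; simp at hlt; omega
  | succ fuel ih =>
    intro n acc hn hlt
    rw [Nat.digits_def' (by norm_num : 1 < 10) hn]
    simp only [Nat.toDigitsCore]
    by_cases h : n / 10 = 0
    · have hn10 : n < 10 := by omega
      simp [h]
    · have h1 : 0 < n / 10 := Nat.pos_of_ne_zero h
      have h2 : n / 10 < 10 ^ fuel := by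
        rw [pow_succ, Nat.mul_comm] at hlt
        exact Nat.div_lt_of_lt_mul hlt
      rw [if_neg h, ih (n / 10) _ h1 h2]
      simp

theorem toDigits_eq (n : Nat) (hn : 0 < n) :
    Nat.toDigits 10 n = ((Nat.digits 10 n).map Nat.digitChar).reverse := by
  have hlt : n < 10 ^ (n + 1) := by
    calc n < 2 ^ n := Nat.lt_two_pow_self
    _ ≤ 10 ^ n := Nat.pow_le_pow_left (by norm_num) n
    _ ≤ 10 ^ (n + 1) := Nat.pow_le_pow_right (by norm_num) (by omega)
  have := toDigitsCore_eq (n + 1) n [] hn hlt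
  simpa [Nat.toDigits] using this

theorem toStr_toList (m : Int) (hm : 1 ≤ m) :
    (PySem.Int.toStr m).toList = ((Nat.digits 10 m.toNat).map Nat.digitChar).reverse := by
  rw [PySem.Int.toList_toStr]
  unfold PySem.Int.toChars
  rw [if_neg (by omega)]
  exact toDigits_eq m.toNat (by omega)

-- ---------- pyDigit on a digit-char list ----------

theorem digitChar_val : ∀ k : Nat, k < 10 → PySem.Int.ofChars? [Nat.digitChar k] = some (k : Int) := by
  decide

theorem pyDigit_map (L : List Nat) (h : ∀ e ∈ L, e < 10) (i : Nat) (hi : i < L.length) :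
    pyDigit (L.map Nat.digitChar) (i : Int) = (L[i] : Int) := by
  unfold pyDigit
  rw [PySem.List.pyGetD_natCast]
  rw [List.getD_eq_getElem _ _ (by simpa using hi)]
  rw [List.getElem_map]
  rw [digitChar_val L[i] (h _ (List.getElem_mem hi))]
  rfl

-- ---------- detect characterization ----------

theorem detectGo_const (num : List Char) (dis : Int) (hdis : dis ≠ 10) :
    ∀ is : List Int, (detectGo num dis is = true ↔
      ∀ i ∈ is, pyDigit num i - pyDigit num (i + 1) = dis) := by
  intro is
  induction is with
  | nil => simp [detectGo]
  | cons i rest ih =>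
    have h10 : (dis == 10) = false := by simp [hdis]
    by_cases hne : dis = pyDigit num i - pyDigit num (i + 1)
    · have hcond : (dis != 10 && dis != (pyDigit num i - pyDigit num (i + 1))) = false := by
        simp [hne]
      simp only [detectGo, h10, hcond, Bool.false_eq_true, if_false, ih]
      constructor
      · intro hrest j hj
        rcases List.mem_cons.mp hj with rfl | hj
        · omega
        · exact hrest j hj
      · intro hall j hj
        exact hall j (List.mem_cons_of_mem _ hj)
    · have hcond : (dis != 10 && dis != (pyDigit num i - pyDigit num (i + 1))) = true := by
        simp only [Bool.and_eq_true, bne_iff_ne]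
        exact ⟨hdis, hne⟩
      simp only [detectGo, h10, hcond, Bool.false_eq_true, if_false, if_true]
      constructor
      · intro h; simp at h
      · intro hall
        exact (hne (hall i List.mem_cons_self).symm).elim

theorem bl_eq_map (m : Int) :
    bl m = ((Nat.digits 10 m.toNat).reverse).map (fun k : Nat => (k : Int)) := rfl

theorem num_eq_map (m : Int) (hm : 1 ≤ m) :
    (PySem.Int.toStr m).toList = ((Nat.digits 10 m.toNat).reverse).map Nat.digitChar := by
  rw [toStr_toList m hm, List.map_reverse]

theorem bl_len (m : Int) : (bl m).length = (Nat.digits 10 m.toNat).length := by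
  simp [bl]

theorem bl_getD_mem (m : Int) (t : Nat) (ht : t < (bl m).length) :
    (bl m).getD t 0 ∈ bl m := by
  rw [List.getD_eq_getElem _ _ ht]
  exact List.getElem_mem ht

-- every entry of bl is a digit 0..9
theorem bl_digits (m : Int) : ∀ x ∈ bl m, 0 ≤ x ∧ x ≤ 9 := by
  intro x hx
  have hx' : ∃ k ∈ Nat.digits 10 m.toNat, (k : Int) = x := by
    simpa [bl] using hx
  obtain ⟨k, hk, rfl⟩ := hx'
  have : k < 10 := Nat.digits_lt_base (by norm_num) hk
  omega

theorem bl_head (m : Int) (hm : 1 ≤ m) : 1 ≤ (bl m).getD 0 0 ∧ (bl m).getD 0 0 ≤ 9 := by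
  have hne : Nat.digits 10 m.toNat ≠ [] := Nat.digits_ne_nil_iff_ne_zero.mpr (by omega)
  have hpos : 0 < (bl m).length := by
    rw [bl_len]; exact List.length_pos_iff.mpr hne
  have h9 := bl_digits m _ (bl_getD_mem m 0 hpos)
  have hval : (bl m).getD 0 0 = ((Nat.digits 10 m.toNat).getLast hne : Int) := by
    rw [List.getD_eq_getElem _ _ hpos]
    simp only [bl_eq_map, List.getElem_map, List.getElem_reverse]
    simp only [List.getLast_eq_getElem, Nat.sub_zero]
  have hlast : (Nat.digits 10 m.toNat).getLast hne ≠ 0 :=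
    Nat.getLast_digit_ne_zero 10 (by omega)
  rw [hval] at h9 ⊢
  omega

theorem bl_length_ge (m : Int) (hm : 100 ≤ m) : 3 ≤ (bl m).length := by
  rw [bl_len, Nat.length_digits 10 m.toNat (by norm_num) (by omega)]
  have h2 : (2 : Nat) ≤ Nat.log 10 m.toNat :=
    (Nat.pow_le_iff_le_log (by norm_num) (by omega)).mp (by omega)
  omega
theorem pyDigit_bl (m : Int) (hm : 1 ≤ m) (t : Nat) (ht : t < (bl m).length) :
    pyDigit ((PySem.Int.toStr m).toList) (t : Int) = (bl m).getD t 0 := by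
  rw [num_eq_map m hm]
  have hlt : t < ((Nat.digits 10 m.toNat).reverse).length := by
    rw [bl_len] at ht; simpa using ht
  rw [pyDigit_map _ (fun e he => Nat.digits_lt_base (by norm_num) (List.mem_reverse.mp he)) t hlt]
  rw [List.getD_eq_getElem _ _ ht]
  simp only [bl_eq_map, List.getElem_map]

theorem detectGo_first (num : List Char) (i : Int) (rest : List Int) :
    detectGo num 10 (i :: rest) = detectGo num (pyDigit num i - pyDigit num (i + 1)) rest := by
  simp only [detectGo, beq_self_eq_true, if_true, bne_self_eq_false, Bool.and_false,
    Bool.false_eq_true, if_false]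

theorem detect_iff (m : Int) (hm : 1 ≤ m) :
    (detect m = true ↔
      ∀ t : Nat, t + 1 < (bl m).length →
        (bl m).getD t 0 - (bl m).getD (t + 1) 0 = (bl m).getD 0 0 - (bl m).getD 1 0) := by
  have hlen : (PySem.Int.toStr m).toList.length = (bl m).length := by
    rw [num_eq_map m hm, bl_len]; simp
  set num := (PySem.Int.toStr m).toList with hnum
  set n := (bl m).length with hn
  have hdet : detect m = detectGo num 10 (PySem.List.pyRange 0 ((n : Int) - 1)) := by
    simp only [detect, PySem.List.len_eq]
    rw [← hnum, hlen]
  by_cases h2 : n < 2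
  · rw [hdet, PySem.List.pyRange_one_eq_nil (by omega)]
    simp only [detectGo, true_iff]
    intro t ht
    omega
  · have hcons : PySem.List.pyRange 0 ((n : Int) - 1)
        = 0 :: PySem.List.pyRange 1 ((n : Int) - 1) := by
      have := PySem.List.pyRange_one_cons (a := 0) (b := (n : Int) - 1) (by omega)
      simpa using this
    have hD : ∀ t : Nat, t < n → pyDigit num (t : Int) = (bl m).getD t 0 := by
      intro t ht; exact pyDigit_bl m hm t ht
    have hD0 : pyDigit num 0 = (bl m).getD 0 0 := by
      have := hD 0 (by omega); simpa using this
    have hD1 : pyDigit num (0 + 1) = (bl m).getD 1 0 := by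
      have := hD 1 (by omega); norm_num at this ⊢; exact this
    have hb0 := bl_digits m _ (bl_getD_mem m 0 (by omega))
    have hb1 := bl_digits m _ (bl_getD_mem m 1 (by omega))
    have hne : (bl m).getD 0 0 - (bl m).getD 1 0 ≠ 10 := by omega
    have hstep : detect m
        = detectGo num ((bl m).getD 0 0 - (bl m).getD 1 0) (PySem.List.pyRange 1 ((n : Int) - 1)) := by
      rw [hdet, hcons, detectGo_first, hD0, hD1]
    rw [hstep, detectGo_const num _ hne]
    constructor
    · intro hall t ht
      by_cases ht0 : t = 0
      · subst ht0; norm_num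
      · have hmem : (t : Int) ∈ PySem.List.pyRange 1 ((n : Int) - 1) := by
          rw [PySem.List.mem_pyRange_one]
          constructor <;> [omega; omega]
        have := hall (t : Int) hmem
        rw [hD t (by omega)] at this
        rw [show ((t : Int) + 1) = ((t + 1 : Nat) : Int) by push_cast; ring] at this
        rw [hD (t + 1) (by omega)] at this
        exact this
    · intro hap i hi
      rw [PySem.List.mem_pyRange_one] at hi
      obtain ⟨hi1, hi2⟩ := hi
      have ht : i = ((i.toNat : Nat) : Int) := by omega
      rw [ht, hD i.toNat (by omega),
        show ((i.toNat : Int) + 1) = ((i.toNat + 1 : Nat) : Int) by push_cast; ring,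
        hD (i.toNat + 1) (by omega)]
      exact hap i.toNat (by omega)



-- ---------- altGo specification ----------

theorem solAltGo_spec (limit a d : Int) (ha : 1 ≤ a) :
    ∀ (fuel : Nat) (s : Nat) (cnt : Int), okdig a d s →
      solAltGo limit d fuel (dig a d (s + 1)) (apval a d s) cnt
        = cnt + ((List.range fuel).countP (fun t => decide (okp limit a d (s + 1 + t))) : Int) := by
  intro fuel
  induction fuel with
  | zero => intro s cnt hok; simp [solAltGo]
  | succ fuel ih =>
    intro s cnt hok
    have hnd : dig a d (s + 1) + d = dig a d (s + 2) := by
      rw [dig_succ]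
    by_cases hbad : dig a d (s + 1) + d < 0 ∨ 9 < dig a d (s + 1) + d
    · have hcond : (dig a d (s + 1) + d < 0 || 9 < dig a d (s + 1) + d) = true := by
        simpa [decide_eq_true_iff] using hbad
      have hzero : (List.range (fuel + 1)).countP (fun t => decide (okp limit a d (s + 1 + t))) = 0 := by
        apply List.countP_eq_zero.mpr
        intro t _
        simp only [decide_eq_true_iff]
        rintro ⟨hokd, -⟩
        have := hokd (s + 2) (by omega)
        rw [hnd] at hbad
        omega
      simp only [solAltGo, hcond, if_true, hzero]
      simp
    · have hcond : (dig a d (s + 1) + d < 0 || 9 < dig a d (s + 1) + d) = false := by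
        simpa [decide_eq_false_iff_not, not_or] using (not_or.mp hbad)
      have hok1 : okdig a d (s + 1) := by
        intro t ht
        rcases Nat.lt_or_ge t (s + 2) with h | h
        · exact hok t (by omega)
        · have ht2 : t = s + 2 := by omega
          subst ht2
          rw [← hnd]
          omega
      have hval1 : apval a d s * 10 + (dig a d (s + 1) + d) = apval a d (s + 1) := by
        rw [hnd, apval_succ]
      by_cases hbig : limit < apval a d s * 10 + (dig a d (s + 1) + d)
      · have hzero : (List.range (fuel + 1)).countP (fun t => decide (okp limit a d (s + 1 + t))) = 0 := by
          apply List.countP_eq_zero.mpr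
          intro t _
          simp only [decide_eq_true_iff]
          rintro ⟨hokd, hle⟩
          have hmono : apval a d (s + 1) ≤ apval a d (s + 1 + t) :=
            apval_mono a d ha hokd (by omega)
          rw [hval1] at hbig
          omega
        simp only [solAltGo, hcond, Bool.false_eq_true, if_false, if_pos hbig, hzero]
        simp
      · have hcount : (List.range (fuel + 1)).countP (fun t => decide (okp limit a d (s + 1 + t)))
            = 1 + (List.range fuel).countP (fun t => decide (okp limit a d (s + 1 + 1 + t))) := by
          rw [List.range_succ_eq_map, List.countP_cons, List.countP_map]
          have h0 : decide (okp limit a d (s + 1 + 0)) = true := by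
            rw [Nat.add_zero]
            simp only [decide_eq_true_iff]
            exact ⟨hok1, by rw [← hval1]; omega⟩
          have hcomp : ((fun t => decide (okp limit a d (s + 1 + t))) ∘ Nat.succ)
              = fun t => decide (okp limit a d (s + 1 + 1 + t)) := by
            funext t
            simp only [Function.comp_apply]
            rw [show s + 1 + Nat.succ t = s + 1 + 1 + t by omega]
          rw [hcomp, h0]
          simp [Nat.add_comm]
        have hrec := ih (s + 1) (cnt + 1) hok1
        rw [← hnd] at hrec
        rw [← hval1] at hrec
        simp only [solAltGo, hcond, Bool.false_eq_true, if_false, if_neg hbig]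
        rw [hrec, hcount]
        push_cast
        ring

-- ---------- shapes of the two programs ----------

def pcN (limit a d : Int) : Nat :=
  if 0 ≤ a + d ∧ a + d ≤ 9 then
    (List.range (limit.natAbs + 1)).countP (fun t => decide (okp limit a d (t + 1)))
  else 0

theorem pyRange_map_sum (a b : Int) (f : Int → Int) :
    ((PySem.List.pyRange a b).map f).sum = ∑ x ∈ Finset.Icc a (b - 1), f x := by
  rw [← List.sum_toFinset f (PySem.List.nodup_pyRange_one a b)]
  apply Finset.sum_congr _ (fun _ _ => rfl)
  ext x
  simp only [List.mem_toFinset, PySem.List.mem_pyRange_one, Finset.mem_Icc]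
  omega

theorem solution_alt_shape (limit : Int) (h : ¬ limit < 100) :
    solution_alt limit = 99 + ∑ a ∈ Finset.Icc (1:Int) 9, ∑ d ∈ Finset.Icc (-9:Int) 9, (pcN limit a d : Int) := by
  unfold solution_alt
  rw [if_neg h]
  have hinner : ∀ (a : Int), 1 ≤ a → a < 10 → ∀ (cnt d : Int), d ∈ PySem.List.pyRange (-9) 10 →
      (if a + d < 0 || 9 < a + d then cnt
       else solAltGo limit d (limit.natAbs + 1) (a + d) (10 * a + (a + d)) cnt)
      = cnt + (pcN limit a d : Int) := by
    intro a ha1 ha2 cnt d _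
    by_cases hv : a + d < 0 ∨ 9 < a + d
    · rw [if_pos (by simpa using hv)]
      unfold pcN
      rw [if_neg (by omega)]
      simp
    · have hv' : 0 ≤ a + d ∧ a + d ≤ 9 := by omega
      rw [if_neg (by simpa using hv)]
      have hdig : dig a d (0 + 1) = a + d := by simp [dig]
      have hval : apval a d 0 = 10 * a + (a + d) := rfl
      have hok0 : okdig a d 0 := by
        intro t ht
        interval_cases t
        · simp only [dig, Nat.cast_zero, zero_mul, add_zero]; omega
        · simp only [dig, Nat.cast_one, one_mul]; omega
      have hspec := solAltGo_spec limit a d (by omega) (limit.natAbs + 1) 0 cnt hok0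
      rw [hdig, hval] at hspec
      rw [hspec]
      unfold pcN
      rw [if_pos hv']
      have hfun : (fun t => decide (okp limit a d (0 + 1 + t)))
          = (fun t => decide (okp limit a d (t + 1))) := by
        funext t
        rw [show 0 + 1 + t = t + 1 by omega]
      rw [hfun]
  have houter : ∀ (cnt a : Int), a ∈ PySem.List.pyRange 1 10 →
      ((PySem.List.pyRange (-9) 10).foldl (fun cnt d =>
        if a + d < 0 || 9 < a + d then cnt
        else solAltGo limit d (limit.natAbs + 1) (a + d) (10 * a + (a + d)) cnt) cnt)
      = cnt + ∑ d ∈ Finset.Icc (-9:Int) 9, (pcN limit a d : Int) := by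
    intro cnt a hmem
    rw [PySem.List.mem_pyRange_one] at hmem
    rw [PySem.List.foldl_congr_mem _ _
        (fun cnt d => cnt + (pcN limit a d : Int)) cnt
        (fun acc d hd => hinner a hmem.1 hmem.2 acc d hd)]
    rw [PySem.List.foldl_add]
    rw [pyRange_map_sum]
    norm_num
  rw [PySem.List.foldl_congr_mem _ _
      (fun cnt a => cnt + ∑ d ∈ Finset.Icc (-9:Int) 9, (pcN limit a d : Int)) 99
      (fun acc a ha => houter acc a ha)]
  rw [PySem.List.foldl_add, pyRange_map_sum]
  norm_num

set_option maxRecDepth 100000 in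
set_option maxHeartbeats 1000000 in
theorem solution_shape (limit : Int) (h : ¬ limit < 100) :
    solution limit = 99 + ((PySem.List.pyRange 100 (limit + 1) 1).countP (fun i => detect i) : Int) := by
  unfold solution
  rw [if_neg h]
  rw [PySem.List.foldl_if_add_one (fun i => detect i)]
  rw [PySem.List.pyRange_one_append 1 100 (limit + 1) (by omega) (by omega), List.countP_append]
  have h99 : (PySem.List.pyRange 1 100).countP (fun i => detect i) = 99 := by decide
  rw [h99]
  push_cast
  ring

-- ---------- the central counting identity ----------

theorem getD_map_range (f : Nat → Int) (n u : Nat) (hu : u < n) :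
    (((List.range n).map f).getD u 0) = f u := by
  rw [List.getD_eq_getElem _ _ (by simpa using hu), List.getElem_map, List.getElem_range]

theorem blval (a d : Int) (t : Nat) (ha : 1 ≤ a) (hok : okdig a d (t + 1)) :
    bl (apval a d (t + 1)) = (List.range (t + 3)).map (fun u => dig a d u) := by
  rw [bl_eq_map, digits_apval a d (t + 1) ha hok, List.reverse_reverse, List.map_map]
  apply List.map_congr_left
  intro u hu
  rw [List.mem_range] at hu
  have := hok u (by omega)
  simp only [Function.comp_apply]
  omega

theorem bl_apval_len (a d : Int) (t : Nat) (ha : 1 ≤ a) (hok : okdig a d (t + 1)) :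
    (bl (apval a d (t + 1))).length = t + 3 := by
  rw [blval a d t ha hok]
  simp

theorem detect_apval (a d : Int) (t : Nat) (ha : 1 ≤ a) (hok : okdig a d (t + 1)) :
    detect (apval a d (t + 1)) = true := by
  have hb := apval_bounds a d (t + 1) ha hok
  have hpow : (1 : Int) ≤ 10 ^ (t + 1 + 1) := one_le_pow₀ (by norm_num)
  rw [detect_iff _ (by omega)]
  intro u hu
  rw [bl_apval_len a d t ha hok] at hu
  rw [blval a d t ha hok]
  rw [getD_map_range _ _ u (by omega), getD_map_range _ _ (u + 1) (by omega),
    getD_map_range _ _ 0 (by omega), getD_map_range _ _ 1 (by omega)]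
  simp only [dig]
  push_cast
  ring

theorem key_apval (a d : Int) (t : Nat) (ha : 1 ≤ a) (hok : okdig a d (t + 1)) :
    (bl (apval a d (t + 1))).getD 0 0 = a ∧ (bl (apval a d (t + 1))).getD 1 0 = a + d := by
  rw [blval a d t ha hok, getD_map_range _ _ 0 (by omega), getD_map_range _ _ 1 (by omega)]
  constructor
  · simp [dig]
  · simp [dig]

theorem bl_getD (m : Int) (u : Nat) (hu : u < (bl m).length) :
    (bl m).getD u 0 = ((Nat.digits 10 m.toNat).getD ((bl m).length - 1 - u) 0 : Int) := by
  have h2 : (bl m).length - 1 - u < (Nat.digits 10 m.toNat).length := by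
    rw [← bl_len]; omega
  rw [List.getD_eq_getElem _ _ hu, List.getD_eq_getElem _ _ h2]
  simp only [bl_eq_map, List.getElem_map, List.getElem_reverse]
  congr 2
  simp

theorem recon_entries (n : Int) (h100 : 100 ≤ n) (hdet : detect n = true) :
    ∀ u, u < (bl n).length →
      (bl n).getD u 0 = dig ((bl n).getD 0 0) ((bl n).getD 1 0 - (bl n).getD 0 0) u := by
  have hap := (detect_iff n (by omega)).mp hdet
  set a := (bl n).getD 0 0 with hA
  set e := (bl n).getD 1 0 - (bl n).getD 0 0 with hE
  intro u
  induction u with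
  | zero => intro _; rw [dig_zero, hA]
  | succ u ih =>
    intro hu
    have hstep := hap u (by omega)
    have ihu := ih (by omega)
    rw [← dig_succ]
    rw [← ihu]
    omega

theorem recon_okdig (n : Int) (h100 : 100 ≤ n) (hdet : detect n = true) :
    okdig ((bl n).getD 0 0) ((bl n).getD 1 0 - (bl n).getD 0 0) ((bl n).length - 2) := by
  have hlen := bl_length_ge n h100
  intro t ht
  rw [← recon_entries n h100 hdet t (by omega)]
  exact bl_digits n _ (bl_getD_mem n t (by omega))

theorem recon_val (n : Int) (h100 : 100 ≤ n) (hdet : detect n = true) :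
    apval ((bl n).getD 0 0) ((bl n).getD 1 0 - (bl n).getD 0 0) ((bl n).length - 2) = n := by
  have hlen := bl_length_ge n h100
  set a := (bl n).getD 0 0 with hA
  set e := (bl n).getD 1 0 - (bl n).getD 0 0 with hE
  have ha : 1 ≤ a := (bl_head n (by omega)).1
  have hok := recon_okdig n h100 hdet
  have hbnd := apval_bounds a e ((bl n).length - 2) ha hok
  have hpow : (1 : Int) ≤ 10 ^ ((bl n).length - 2 + 1) := one_le_pow₀ (by norm_num)
  -- digit lists agree
  have hdig : Nat.digits 10 n.toNat
      = ((List.range ((bl n).length - 2 + 2)).map (fun t => (dig a e t).toNat)).reverse := by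
    have hL : ((bl n).length - 2) + 2 = (Nat.digits 10 n.toNat).length := by
      rw [← bl_len]; omega
    apply List.ext_getElem
    · simp [hL]
    · intro i h1 h2
      have hi : i < (bl n).length := by rw [bl_len]; omega
      have hrev : (bl n).getD ((bl n).length - 1 - i) 0
          = ((Nat.digits 10 n.toNat)[i] : Int) := by
        rw [bl_getD n ((bl n).length - 1 - i) (by omega)]
        rw [List.getD_eq_getElem _ _ (by rw [← bl_len]; omega)]
        congr 2
        omega
      have hent := recon_entries n h100 hdet ((bl n).length - 1 - i) (by omega)
      rw [← hA, ← hE] at hent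
      rw [hrev] at hent
      rw [List.getElem_reverse, List.getElem_map, List.getElem_range]
      have hnn : 0 ≤ dig a e ((bl n).length - 1 - i) :=
        (hok ((bl n).length - 1 - i) (by omega)).1
      have hidx : (List.map (fun t => (dig a e t).toNat) (List.range ((bl n).length - 2 + 2))).length - 1 - i
          = (bl n).length - 1 - i := by
        simp only [List.length_map, List.length_range]
        omega
      rw [hidx]
      omega
  have htn : n.toNat = (apval a e ((bl n).length - 2)).toNat := by
    conv_lhs => rw [← Nat.ofDigits_digits 10 n.toNat]
    rw [hdig, ← digits_apval a e ((bl n).length - 2) ha hok, Nat.ofDigits_digits]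
  omega

-- the number of iterations is always smaller than the fuel bound
theorem idx_lt_pow (k : Nat) : (k : Int) < 10 ^ k := by
  induction k with
  | zero => norm_num
  | succ k ih =>
    have hpow : (1 : Int) ≤ 10 ^ k := one_le_pow₀ (by norm_num)
    rw [pow_succ]
    push_cast
    nlinarith

def keyf (n : Int) : Int × Int := ((bl n).getD 0 0, (bl n).getD 1 0 - (bl n).getD 0 0)

theorem countP_list_eq_card (F : Nat) (p : Nat → Bool) :
    (List.range F).countP p = ((Finset.range F).filter (fun t => p t = true)).card := by
  rw [List.countP_eq_length_filter,
    ← List.toFinset_card_of_nodup ((List.nodup_range).filter p),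
    List.toFinset_filter, List.toFinset_range]

set_option maxHeartbeats 1000000 in
theorem fiber_card (limit a d : Int) (h : ¬ limit < 100)
    (ha : a ∈ Finset.Icc (1:Int) 9) (hd : d ∈ Finset.Icc (-9:Int) 9) :
    (((Finset.Ioc (99:Int) limit).filter (fun x => detect x = true)).filter
        (fun n => keyf n = (a, d))).card = pcN limit a d := by
  rw [Finset.mem_Icc] at ha hd
  by_cases hgood : 0 ≤ a + d ∧ a + d ≤ 9
  · unfold pcN
    rw [if_pos hgood, countP_list_eq_card]
    symm
    apply Finset.card_nbij (fun t => apval a d (t + 1))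
    · intro t ht
      simp only [Finset.mem_coe, Finset.mem_filter, Finset.mem_range,
        decide_eq_true_iff] at ht
      obtain ⟨-, hok, hle⟩ := ht
      have hb := apval_bounds a d (t + 1) ha.1 hok
      have hp : (100 : Int) ≤ 10 ^ (t + 1 + 1) := by
        calc (100 : Int) = 10 ^ 2 := by norm_num
        _ ≤ 10 ^ (t + 1 + 1) := pow_le_pow_right₀ (by norm_num) (by omega)
      have hkey := key_apval a d t ha.1 hok
      simp only [Finset.mem_coe, Finset.mem_filter, Finset.mem_Ioc]
      refine ⟨⟨⟨by omega, hle⟩, detect_apval a d t ha.1 hok⟩, ?_⟩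
      simp only [keyf, hkey.1, hkey.2, Prod.mk.injEq]
      exact ⟨by trivial, by ring⟩
    · intro t ht t' ht' heq
      simp only [Finset.mem_coe, Finset.mem_filter, Finset.mem_range,
        decide_eq_true_iff] at ht ht'
      have heq' : apval a d (t + 1) = apval a d (t' + 1) := heq
      by_contra hne
      rcases Nat.lt_or_ge t t' with hlt | hge
      · have := apval_strict_mono a d ha.1 ht'.2.1 (show t + 1 < t' + 1 by omega)
        omega
      · have hlt : t' < t := by omega
        have := apval_strict_mono a d ha.1 ht.2.1 (show t' + 1 < t + 1 by omega)
        omega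
    · intro n hn
      simp only [Finset.mem_coe, Finset.mem_filter, Finset.mem_Ioc] at hn
      obtain ⟨⟨⟨h99, hle⟩, hdet⟩, hkey⟩ := hn
      have h100 : 100 ≤ n := by omega
      have hL := bl_length_ge n h100
      have hkA : (bl n).getD 0 0 = a := by
        have := congrArg Prod.fst hkey; simpa [keyf] using this
      have hkE : (bl n).getD 1 0 - (bl n).getD 0 0 = d := by
        have := congrArg Prod.snd hkey; simpa [keyf] using this
      have hok : okdig a d ((bl n).length - 2) := by
        rw [← hkA, ← hkE]; exact recon_okdig n h100 hdet
      have hval : apval a d ((bl n).length - 2) = n := by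
        rw [← hkA, ← hkE]; exact recon_val n h100 hdet
      have hb := apval_bounds a d ((bl n).length - 2) ha.1 hok
      have hidx := idx_lt_pow ((bl n).length - 2 + 1)
      refine ⟨(bl n).length - 3, ?_, ?_⟩
      · simp only [Finset.mem_coe, Finset.mem_filter, Finset.mem_range,
          decide_eq_true_iff]
        have htlt : (bl n).length - 3 < limit.natAbs + 1 := by
          have h2 := hb.1
          rw [hval] at h2
          have h1 : (((bl n).length - 2 + 1 : Nat) : Int) < limit := by
            linarith [hidx, h2, hle]
          omega
        refine ⟨htlt, ?_, ?_⟩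
        · rw [show (bl n).length - 3 + 1 = (bl n).length - 2 by omega]
          exact hok
        · rw [show (bl n).length - 3 + 1 = (bl n).length - 2 by omega, hval]
          exact hle
      · show apval a d ((bl n).length - 3 + 1) = n
        rw [show (bl n).length - 3 + 1 = (bl n).length - 2 by omega]
        exact hval
  · unfold pcN
    rw [if_neg hgood]
    rw [Finset.card_eq_zero, Finset.filter_eq_empty_iff]
    intro n hn
    rw [Finset.mem_filter, Finset.mem_Ioc] at hn
    obtain ⟨⟨h99, -⟩, -⟩ := hn
    intro hkey
    have h100 : 100 ≤ n := by omega
    have hL := bl_length_ge n h100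
    have hb1 := bl_digits n _ (bl_getD_mem n 1 (by omega))
    have hkA : (bl n).getD 0 0 = a := by
      have := congrArg Prod.fst hkey; simpa [keyf] using this
    have hkE : (bl n).getD 1 0 - (bl n).getD 0 0 = d := by
      have := congrArg Prod.snd hkey; simpa [keyf] using this
    omega

theorem central (limit : Int) (h : ¬ limit < 100) :
    (PySem.List.pyRange 100 (limit + 1) 1).countP (fun i => detect i)
      = ∑ a ∈ Finset.Icc (1:Int) 9, ∑ d ∈ Finset.Icc (-9:Int) 9, pcN limit a d := by
  have hstep1 : (PySem.List.pyRange 100 (limit + 1) 1).countP (fun i => detect i)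
      = ((Finset.Ioc (99:Int) limit).filter (fun x => detect x = true)).card := by
    have hset : (PySem.List.pyRange 100 (limit + 1) 1).toFinset = Finset.Ioc (99:Int) limit := by
      ext x
      simp only [List.mem_toFinset, PySem.List.mem_pyRange_one, Finset.mem_Ioc]
      omega
    rw [List.countP_eq_length_filter,
      ← List.toFinset_card_of_nodup ((PySem.List.nodup_pyRange_one _ _).filter _),
      List.toFinset_filter, hset]
  rw [hstep1]
  have hmaps : ∀ n ∈ (Finset.Ioc (99:Int) limit).filter (fun x => detect x = true),
      keyf n ∈ Finset.Icc (1:Int) 9 ×ˢ Finset.Icc (-9:Int) 9 := by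
    intro n hn
    rw [Finset.mem_filter, Finset.mem_Ioc] at hn
    obtain ⟨⟨h99, -⟩, -⟩ := hn
    have h100 : 100 ≤ n := by omega
    have hL := bl_length_ge n h100
    have hh := bl_head n (by omega)
    have hb1 := bl_digits n _ (bl_getD_mem n 1 (by omega))
    simp only [keyf, Finset.mem_product, Finset.mem_Icc]
    omega
  rw [Finset.card_eq_sum_card_fiberwise hmaps, Finset.sum_product]
  apply Finset.sum_congr rfl
  intro a ha
  apply Finset.sum_congr rfl
  intro d hd
  exact fiber_card limit a d h ha hd

-- ===== VERDICT (by name: the statement is the Claim_ definition above) =====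
theorem solution_spec : Claim_equal_solution := by
  intro limit _
  unfold Spec_solution
  by_cases h : limit < 100
  · simp [solution, solution_alt, h]
  · rw [solution_shape limit h, solution_alt_shape limit h, central limit h]
    push_cast
    ring
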